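-- pv_equiv track=rewrite | github.com/rizarae-p/reef-stitching | map.py | parse_vgg_parts
-- ===== SOURCE A (Python) =====
-- def parse_vgg_parts(l):
-- 	parts = [{},{},{}]
-- 	for i,elem in enumerate(l):
-- 		elem = elem.strip().split(",")
-- 		imagename = elem[0]
-- 		coords = [int(x) for x in elem[2:4]]
-- 		if imagename not in parts[i%3].keys():
-- 			parts[i%3][imagename] = [coords]
-- 		else:
-- 			parts[i%3][imagename].append(coords)
-- 	return parts[0],parts[1],parts[2]
-- ===== SOURCE B (Python) =====
-- def parse_vgg_parts(l):
-- 	def group(lines):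
-- 		d = {}
-- 		for line in lines:
-- 			elem = line.strip().split(",")
-- 			coords = [int(x) for x in elem[2:4]]
-- 			d.setdefault(elem[0], []).append(coords)
-- 		return d
-- 	return group(l[0::3]), group(l[1::3]), group(l[2::3])
-- ===== Notes on version B (the rewrite author's own statement) =====
-- stated objective: simpler
-- what changed: Replaces the single enumerate/i%3-dispatch loop with three independent passes over the pre-grouped strided slices l[0::3], l[1::3], l[2::3], each built by one helper using dict.setdefault instead of the explicit key-membership branch.
import Mathlib
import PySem

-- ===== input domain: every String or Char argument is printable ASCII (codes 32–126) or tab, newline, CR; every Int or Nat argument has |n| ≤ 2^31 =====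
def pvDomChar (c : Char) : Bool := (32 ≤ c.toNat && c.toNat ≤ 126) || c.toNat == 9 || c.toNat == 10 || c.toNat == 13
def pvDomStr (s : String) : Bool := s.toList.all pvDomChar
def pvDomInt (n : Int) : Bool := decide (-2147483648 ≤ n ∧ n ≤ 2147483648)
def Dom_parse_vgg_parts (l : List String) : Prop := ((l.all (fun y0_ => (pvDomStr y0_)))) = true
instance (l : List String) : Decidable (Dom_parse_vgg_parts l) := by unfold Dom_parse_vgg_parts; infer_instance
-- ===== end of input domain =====

-- B replaces A's single enumerate/i%3-dispatch loop by three independent passes over the strided slices l[0::3], l[1::3], l[2::3], each folded with dict.setdefault (objective: simpler; same cost).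

abbrev pvD := PySem.Dict String (List (List Int))

-- ===== PORT A =====
def pvUpdA (d : pvD) (imagename : String) (coords : List Int) : pvD :=
  if d.contains imagename = false then d.insert imagename [coords]
  else d.modify imagename [] (fun v => v ++ [coords])

def pvAStep (parts : pvD × pvD × pvD) (ie : Int × String) : pvD × pvD × pvD :=
  let elem := (PySem.Str.split? (PySem.Str.strip ie.2) ",").getD []  -- sep "," ≠ "": split? is never none
  let imagename := (PySem.List.pyGet? elem 0).getD ""                -- split result is nonempty: never none
  let coords := (PySem.List.slice elem (some 2) (some 4)).map (fun x => (PySem.Int.ofStr? x).getD 0)  -- none = ValueError, excluded by Pre_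
  let r := PySem.Int.mod ie.1 3
  if r = 0 then (pvUpdA parts.1 imagename coords, parts.2.1, parts.2.2)
  else if r = 1 then (parts.1, pvUpdA parts.2.1 imagename coords, parts.2.2)
  else (parts.1, parts.2.1, pvUpdA parts.2.2 imagename coords)

def parse_vgg_parts (l : List String) : (List (String × List (List Int))) × (List (String × List (List Int))) × (List (String × List (List Int))) :=
  let parts0 : pvD × pvD × pvD := (PySem.Dict.empty, PySem.Dict.empty, PySem.Dict.empty)
  let parts := (PySem.List.enumerate l).foldl pvAStep parts0
  (parts.1.items, parts.2.1.items, parts.2.2.items)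

-- ===== PORT B =====
def pvGroup (lines : List String) : pvD :=
  lines.foldl (fun d line =>
    let elem := (PySem.Str.split? (PySem.Str.strip line) ",").getD []  -- sep "," ≠ "": split? is never none
    let coords := (PySem.List.slice elem (some 2) (some 4)).map (fun x => (PySem.Int.ofStr? x).getD 0)  -- none = ValueError, excluded by Pre_
    let key := (PySem.List.pyGet? elem 0).getD ""                      -- split result is nonempty: never none
    (d.setdefault key []).modify key [] (fun v => v ++ [coords]))      -- d.setdefault(elem[0], []).append(coords)
    PySem.Dict.empty

def parse_vgg_parts_alt (l : List String) : (List (String × List (List Int))) × (List (String × List (List Int))) × (List (String × List (List Int))) :=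
  -- slice? is none only for step 0; the step is 3, so .getD [] never fires
  ((pvGroup ((PySem.List.slice? l (some 0) none 3).getD [])).items,
   (pvGroup ((PySem.List.slice? l (some 1) none 3).getD [])).items,
   (pvGroup ((PySem.List.slice? l (some 2) none 3).getD [])).items)

-- ===== PRECONDITION & SPEC =====
-- Pre_ excludes exactly the inputs on which Python A raises ValueError: a line whose comma-fields 2..3 are not all int() literals.
def Pre_parse_vgg_parts (l : List String) : Prop :=
  ∀ s ∈ l, ∀ t ∈ PySem.List.slice ((PySem.Str.split? (PySem.Str.strip s) ",").getD []) (some 2) (some 4),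
    (PySem.Int.ofStr? t).isSome = true
instance (l : List String) : Decidable (Pre_parse_vgg_parts l) := by unfold Pre_parse_vgg_parts; infer_instance

def pvWitness_parse_vgg_parts : List String := ["a.png,region,1,2", "b.png,region,3,4"]

def Spec_parse_vgg_parts (l : List String) (out : (List (String × List (List Int))) × (List (String × List (List Int))) × (List (String × List (List Int)))) : Prop := out = parse_vgg_parts_alt l
instance (l : List String) (out : (List (String × List (List Int))) × (List (String × List (List Int))) × (List (String × List (List Int)))) : Decidable (Spec_parse_vgg_parts l out) := by unfold Spec_parse_vgg_parts; infer_instance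

-- ===== CLAIM (what is proved, stated in full; the proofs are below) =====
def Claim_equal_parse_vgg_parts : Prop := ∀ (l : List String), Dom_parse_vgg_parts l → Pre_parse_vgg_parts l → Spec_parse_vgg_parts l (parse_vgg_parts l)

-- ===== LEMMAS AND PROOFS =====

-- the per-line key and coordinate list both programs extract
def pvKey (s : String) : String :=
  (PySem.List.pyGet? ((PySem.Str.split? (PySem.Str.strip s) ",").getD []) 0).getD ""
def pvCoords (s : String) : List Int :=
  (PySem.List.slice ((PySem.Str.split? (PySem.Str.strip s) ",").getD []) (some 2) (some 4)).map
    (fun x => (PySem.Int.ofStr? x).getD 0)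

-- fold a group of lines into one dict with A's update
def pvF (d : pvD) (xs : List String) : pvD := xs.foldl (fun d s => pvUpdA d (pvKey s) (pvCoords s)) d

-- every third element, starting at the head
def pvSt {α : Type} : List α → List α
  | [] => []
  | x :: xs => x :: pvSt (xs.drop 2)
termination_by l => l.length
decreasing_by simp

lemma pvSt_nil {α : Type} : pvSt ([] : List α) = [] := by rw [pvSt]
lemma pvSt_cons {α : Type} (x : α) (xs : List α) : pvSt (x :: xs) = x :: pvSt (xs.drop 2) := by rw [pvSt]

-- A's loop with the three dicts in "current slot first" rotation
def pvGo : List String → pvD → pvD → pvD → pvD × pvD × pvD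
  | [], a, b, c => (a, b, c)
  | x :: xs, a, b, c =>
      let t := pvGo xs b c (pvUpdA a (pvKey x) (pvCoords x))
      (t.2.2, t.1, t.2.1)

lemma pvStepB_eq (d : pvD) (s : String) :
    ((d.setdefault (pvKey s) []).modify (pvKey s) [] (fun v => v ++ [pvCoords s])) =
      pvUpdA d (pvKey s) (pvCoords s) := by
  by_cases h : d.contains (pvKey s)
  · rw [PySem.Dict.setdefault_of_contains d _ h]
    simp [pvUpdA, h]
  · simp only [Bool.not_eq_true] at h
    rw [PySem.Dict.setdefault_of_not_contains d _ h]
    simp [PySem.Dict.modify, PySem.Dict.getD_insert_self, PySem.Dict.insert_insert_self, pvUpdA, h]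

lemma pvGroup_eq (xs : List String) : pvGroup xs = pvF PySem.Dict.empty xs := by
  unfold pvGroup pvF
  exact PySem.List.foldl_congr_mem _ _ _ _ (fun acc x _ => pvStepB_eq acc x)

lemma pvAStep_mod (parts : pvD × pvD × pvD) (i : Int) (s : String) :
    pvAStep parts (i, s) =
      (if PySem.Int.mod i 3 = 0 then (pvUpdA parts.1 (pvKey s) (pvCoords s), parts.2.1, parts.2.2)
       else if PySem.Int.mod i 3 = 1 then (parts.1, pvUpdA parts.2.1 (pvKey s) (pvCoords s), parts.2.2)
       else (parts.1, parts.2.1, pvUpdA parts.2.2 (pvKey s) (pvCoords s))) := rfl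

lemma pvCore (l : List String) : ∀ (n : Nat) (a b c : pvD),
    (PySem.List.enumerate l (n : Int)).foldl pvAStep (a, b, c) =
      if n % 3 = 0 then pvGo l a b c
      else if n % 3 = 1 then ((pvGo l b c a).2.2, (pvGo l b c a).1, (pvGo l b c a).2.1)
      else ((pvGo l c a b).2.1, (pvGo l c a b).2.2, (pvGo l c a b).1) := by
  induction l with
  | nil =>
      intro n a b c
      rw [PySem.List.enumerate_nil]
      split_ifs <;> rfl
  | cons x xs ih =>
      intro n a b c
      rw [PySem.List.enumerate_cons, List.foldl_cons, pvAStep_mod]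
      have hmod : PySem.Int.mod (n : Int) 3 = ((n % 3 : Nat) : Int) := by
        exact_mod_cast PySem.Int.mod_natCast n 3
      have hcast : ((n : Int) + 1) = (((n + 1 : Nat)) : Int) := by push_cast; ring
      have h3 : n % 3 = 0 ∨ n % 3 = 1 ∨ n % 3 = 2 := by omega
      rcases h3 with h | h | h
      · have h1 : (n + 1) % 3 = 1 := by omega
        rw [hmod, h]
        norm_num
        rw [hcast, ih (n + 1)]
        simp [h1, pvGo]
      · have h1 : (n + 1) % 3 = 2 := by omega
        rw [hmod, h]
        norm_num
        rw [hcast, ih (n + 1)]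
        simp [h1, pvGo]
      · have h1 : (n + 1) % 3 = 0 := by omega
        rw [hmod, h]
        norm_num
        rw [hcast, ih (n + 1)]
        simp [h1, pvGo]

lemma pvGo_eq (l : List String) : ∀ a b c : pvD,
    pvGo l a b c = (pvF a (pvSt l), pvF b (pvSt (l.drop 1)), pvF c (pvSt (l.drop 2))) := by
  induction l with
  | nil => intro a b c; simp [pvGo, pvSt_nil, pvF]
  | cons x xs ih =>
      intro a b c
      simp only [pvGo, ih]
      simp [pvSt_cons, pvF, List.drop_succ_cons]

lemma pvFilterMap {α : Type} (m : List α) :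
    (List.range ((m.length + 2) / 3)).filterMap (fun j => m[3 * j]?) = pvSt m := by
  induction m using pvSt.induct with
  | case1 => rw [pvSt]; simp
  | case2 x xs ih =>
      have hc : (xs.length + 1 + 2) / 3 = ((xs.drop 2).length + 2) / 3 + 1 := by
        simp; omega
      rw [pvSt]
      simp only [List.length_cons, hc, List.range_succ_eq_map, List.filterMap_cons]
      simp only [Nat.mul_zero, List.getElem?_cons_zero, List.filterMap_map]
      congr 1
      have hfun : ((fun j => (x :: xs)[3 * j]?) ∘ Nat.succ) = (fun j => (xs.drop 2)[3 * j]?) := by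
        funext j
        simp only [Function.comp_apply, Nat.succ_eq_add_one,
          show 3 * (j + 1) = (3 * j + 2) + 1 from by ring, List.getElem?_cons_succ]
        rw [List.getElem?_drop]
        congr 1
        omega
      rw [hfun, ih]

lemma pvSlice {α : Type} (l : List α) (k : Nat) :
    (PySem.List.slice? l (some (k : Int)) none 3).getD [] = pvSt (l.drop k) := by
  unfold PySem.List.slice? PySem.List.sliceIndices
  norm_num
  have hk : ¬ ((k : Int) < 0) := by omega
  rw [if_neg hk]
  by_cases hlt : k < l.length
  · have hm : min (k : Int) (l.length : Int) = (k : Int) := by omega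
    rw [hm, if_pos (by exact_mod_cast hlt)]
    have hcount : ((((l.length : Int) - (k : Int) + 3 - 1) / 3)).toNat = ((l.drop k).length + 2) / 3 := by
      have h1 : ((l.length : Int) - (k : Int) + 3 - 1) = (((l.length - k + 2 : Nat)) : Int) := by
        push_cast [Nat.cast_sub (le_of_lt hlt)]; ring
      rw [h1]
      have h2 : (((l.length - k + 2 : Nat) : Int) / 3) = (((l.length - k + 2) / 3 : Nat) : Int) := by
        omega
      rw [h2, Int.toNat_natCast]
      simp
    rw [hcount]
    have hfun : (fun (j : Nat) => l[((k : Int) + 3 * (j : Int)).toNat]?) = (fun j => (l.drop k)[3 * j]?) := by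
      funext j
      rw [List.getElem?_drop]
      have hidx : ((k : Int) + 3 * (j : Int)).toNat = k + 3 * j := by omega
      rw [hidx]
    rw [hfun, pvFilterMap]
  · have hm : min (k : Int) (l.length : Int) = (l.length : Int) := by omega
    rw [hm, if_neg (by omega : ¬ ((l.length : Int) < (l.length : Int))),
      List.drop_eq_nil_of_le (by omega), List.range_zero, List.filterMap_nil,
      show pvSt ([] : List α) = [] from by rw [pvSt]]

-- ===== VERDICT (by name: the statement is the Claim_ definition above) =====
theorem parse_vgg_parts_spec : Claim_equal_parse_vgg_parts := by
  intro l _ _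
  unfold Spec_parse_vgg_parts
  simp only [parse_vgg_parts, parse_vgg_parts_alt]
  have h0 := pvCore l 0 PySem.Dict.empty PySem.Dict.empty PySem.Dict.empty
  norm_num at h0
  rw [h0]
  have s0 := pvSlice l 0
  have s1 := pvSlice l 1
  have s2 := pvSlice l 2
  simp only [Nat.cast_zero, Nat.cast_one, Nat.cast_ofNat, List.drop_zero] at s0 s1 s2
  rw [s0, s1, s2]
  simp [pvGo_eq, pvGroup_eq, pvF]
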